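-- pv_equiv track=rewrite | github.com/k906506/CodingTest | 2021 네이버웹툰/1.py | solution
-- ===== SOURCE A (Python) =====
-- def solution(lottery):
--     result = dict()
--
--     for i, j in lottery:
--         if result.get(i) == None:
--             result[i] = [0, 0]
--         if j == 0:  # 미당첨
--             if result[i][1] == 0:  # 아직 미당첨인 경우
--                 result[i][0] += 1
--         else:
--             if result[i][1] == 0:  # 첫 번째 당첨인 경우
--                 result[i][0] += 1
--                 result[i][1] = 1
--
--     sum = 0
--     cnt = 0
--     for e in result:
--         if result[e][1] == 1:
--             cnt += 1
--             sum += result[e][0]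
--
--     if cnt == 0:
--         return 0
--
--     return sum // cnt
-- ===== SOURCE B (Python) =====
-- def solution(lottery):
--     groups = {}
--     for i, j in lottery:
--         groups.setdefault(i, []).append(j)
--     total = 0
--     cnt = 0
--     for js in groups.values():
--         idx = next((k for k, v in enumerate(js) if v != 0), None)
--         if idx is not None:
--             total += idx + 1
--             cnt += 1
--     return 0 if cnt == 0 else total // cnt
-- ===== Notes on version B (the rewrite author's own statement) =====
-- stated objective: alternative
-- what changed: B replaces A's interleaved per-entry (count, won-flag) state machine with a build-index-then-scan decomposition: one pass groups each key's results into a dict of lists, a second pass reads off the position of the first win per key and averages.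
import Mathlib
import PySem

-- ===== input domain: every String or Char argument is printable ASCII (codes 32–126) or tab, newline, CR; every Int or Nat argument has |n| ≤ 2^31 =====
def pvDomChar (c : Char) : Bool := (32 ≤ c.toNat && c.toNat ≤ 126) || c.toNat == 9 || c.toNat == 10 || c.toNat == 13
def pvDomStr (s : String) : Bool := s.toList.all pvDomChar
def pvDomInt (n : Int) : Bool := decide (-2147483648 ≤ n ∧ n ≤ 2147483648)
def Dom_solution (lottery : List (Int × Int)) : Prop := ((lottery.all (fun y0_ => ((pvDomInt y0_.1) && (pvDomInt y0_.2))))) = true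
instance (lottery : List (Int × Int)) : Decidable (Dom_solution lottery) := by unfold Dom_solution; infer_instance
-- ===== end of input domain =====

-- B replaces A's interleaved per-entry state machine (count,flag updated in place) by
-- build-an-index-then-scan: group each key's results once, then read off the position of
-- the first win per key; same values, different decomposition (objective: alternative).

-- ===== PORT A =====
-- one iteration of A's first loop over (i, j)
def pvStepA (d : PySem.Dict Int (Int × Int)) (p : Int × Int) : PySem.Dict Int (Int × Int) :=
  let d1 := if d.get? p.1 == none then d.insert p.1 (0, 0) else d
  if p.2 == 0 then
    if (d1.getD p.1 (0, 0)).2 == 0 then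
      d1.modify p.1 (0, 0) (fun q => (q.1 + 1, q.2))
    else d1
  else
    if (d1.getD p.1 (0, 0)).2 == 0 then
      (d1.modify p.1 (0, 0) (fun q => (q.1 + 1, q.2))).modify p.1 (0, 0) (fun q => (q.1, 1))
    else d1

def solution (lottery : List (Int × Int)) : Int :=
  let result := lottery.foldl pvStepA PySem.Dict.empty
  let sc := result.keys.foldl (fun (s : Int × Int) e =>
      if (result.getD e (0, 0)).2 == 1 then (s.1 + (result.getD e (0, 0)).1, s.2 + 1) else s)
    (0, 0)
  if sc.2 == 0 then 0 else PySem.Int.floordiv sc.1 sc.2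

-- ===== PORT B =====
-- one iteration of B's grouping loop (groups.setdefault(i, []).append(j))
def pvStepB (d : PySem.Dict Int (List Int)) (p : Int × Int) : PySem.Dict Int (List Int) :=
  d.modify p.1 [] (fun l => l ++ [p.2])

def solution_alt (lottery : List (Int × Int)) : Int :=
  let groups := lottery.foldl pvStepB PySem.Dict.empty
  let tc := groups.values.foldl (fun (s : Int × Int) js =>
      match js.findIdx? (fun v => v != 0) with
      | some idx => (s.1 + ((idx : Int) + 1), s.2 + 1)
      | none => s)
    (0, 0)
  if tc.2 == 0 then 0 else PySem.Int.floordiv tc.1 tc.2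

-- ===== PRECONDITION & SPEC =====
def Spec_solution (lottery : List (Int × Int)) (out : Int) : Prop := out = solution_alt lottery
instance (lottery : List (Int × Int)) (out : Int) : Decidable (Spec_solution lottery out) := by unfold Spec_solution; infer_instance

-- ===== CLAIM (what is proved, stated in full; the proofs are below) =====
def Claim_equal_solution : Prop := ∀ (lottery : List (Int × Int)), Dom_solution lottery → Spec_solution lottery (solution lottery)

-- ===== LEMMAS AND PROOFS =====

-- A's per-key state (count, flag) as a function of the key's grouped result list
def pvF (js : List Int) : Int × Int :=
  match js.findIdx? (fun v => v != 0) with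
  | some n => ((n : Int) + 1, 1)
  | none => ((js.length : Int), 0)

theorem pvStep_rel (dA : PySem.Dict Int (Int × Int)) (dB : PySem.Dict Int (List Int))
    (hk : dA.keys = dB.keys) (hv : ∀ k, dA.get? k = (dB.get? k).map pvF) (p : Int × Int) :
    (pvStepA dA p).keys = (pvStepB dB p).keys ∧
      ∀ k, (pvStepA dA p).get? k = ((pvStepB dB p).get? k).map pvF := by
  obtain ⟨i, j⟩ := p
  have hmodA : ∀ (d : PySem.Dict Int (Int × Int)) (k : Int) (f : Int × Int → Int × Int),
      d.modify k (0, 0) f = d.insert k (f (d.getD k (0, 0))) := fun _ _ _ => rfl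
  have hmodB : ∀ (d : PySem.Dict Int (List Int)) (k : Int) (f : List Int → List Int),
      d.modify k [] f = d.insert k (f (d.getD k [])) := fun _ _ _ => rfl
  cases hB : dB.get? i with
  | none =>
    have hA : dA.get? i = none := by rw [hv i, hB]; rfl
    have hcB : dB.contains i = false := (PySem.Dict.get?_eq_none_iff_contains dB i).mp hB
    have hcA : dA.contains i = false := (PySem.Dict.get?_eq_none_iff_contains dA i).mp hA
    have hgB : dB.getD i [] = [] := PySem.Dict.getD_of_get?_eq_none dB [] hB
    constructor
    · have hk1 : (dA.insert i ((0 : Int), (0 : Int))).keys = dA.keys ++ [i] :=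
        PySem.Dict.keys_insert_of_not_contains dA _ hcA
      have hc1 : (dA.insert i ((0 : Int), (0 : Int))).contains i = true := by
        simp [PySem.Dict.contains_insert]
      have hkc1 : ∀ v : Int × Int, ((dA.insert i (0, 0)).insert i v).keys = dA.keys ++ [i] := by
        intro v; rw [PySem.Dict.keys_insert_of_contains _ v hc1, hk1]
      have hc2 : ∀ v : Int × Int, ((dA.insert i (0, 0)).insert i v).contains i = true := by
        intro v; simp [PySem.Dict.contains_insert]
      have hkc2 : ∀ v w : Int × Int,
          (((dA.insert i (0, 0)).insert i v).insert i w).keys = dA.keys ++ [i] := by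
        intro v w; rw [PySem.Dict.keys_insert_of_contains _ w (hc2 v), hkc1]
      simp only [pvStepA, pvStepB, hA, hmodA, hmodB, hgB]
      rw [PySem.Dict.keys_insert_of_not_contains dB _ hcB]
      split_ifs <;> simp_all [hk1, hkc1, hkc2]
    · intro k
      simp only [pvStepA, pvStepB, hA, hmodA, hmodB, hgB]
      by_cases hj : j = 0
      · subst hj
        have h0 : pvF [(0 : Int)] = (1, 0) := by
          simp [pvF, List.findIdx?, List.findIdx?.go]
        by_cases hki : k = i <;>
          simp [hki, PySem.Dict.get?_insert, PySem.Dict.getD_insert_self, h0, hv k]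
      · have hj' : (j == 0) = false := by simp [hj]
        have h1 : pvF [j] = (1, 1) := by
          simp [pvF, List.findIdx?, List.findIdx?.go, hj]
        by_cases hki : k = i <;>
          simp [hki, hj', PySem.Dict.get?_insert, PySem.Dict.getD_insert_self, h1, hv k]
  | some js =>
    have hA : dA.get? i = some (pvF js) := by rw [hv i, hB]; rfl
    have hgB : dB.getD i [] = js := PySem.Dict.getD_of_get?_eq_some dB [] hB
    have hgA : dA.getD i (0, 0) = pvF js := PySem.Dict.getD_of_get?_eq_some dA (0, 0) hA
    have hcB : dB.contains i = true := by
      have h := PySem.Dict.get?_eq_none_iff_contains dB i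
      cases hc : dB.contains i
      · rw [h.mpr hc] at hB; exact absurd hB (by simp)
      · rfl
    have hcA : dA.contains i = true := by
      have h := PySem.Dict.get?_eq_none_iff_contains dA i
      cases hc : dA.contains i
      · rw [h.mpr hc] at hA; exact absurd hA (by simp)
      · rfl
    have hAne : (dA.get? i == none) = false := by simp [hA]
    have hkA1 : ∀ v : Int × Int, (dA.insert i v).keys = dA.keys := fun v =>
      PySem.Dict.keys_insert_of_contains dA v hcA
    have hcA1 : ∀ v : Int × Int, (dA.insert i v).contains i = true := by
      intro v; simp [PySem.Dict.contains_insert]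
    have hkA2 : ∀ v w : Int × Int, ((dA.insert i v).insert i w).keys = dA.keys := by
      intro v w; rw [PySem.Dict.keys_insert_of_contains _ w (hcA1 v), hkA1]
    cases hF : js.findIdx? (fun v => v != 0) with
    | some n =>
      have hpv : pvF js = ((n : Int) + 1, 1) := by simp [pvF, hF]
      have hnew : pvF (js ++ [j]) = ((n : Int) + 1, 1) := by
        simp [pvF, List.findIdx?_append, hF]
      constructor
      · simp only [pvStepA, pvStepB, hAne, Bool.false_eq_true, if_false, hmodA, hmodB,
          hgA, hpv, hgB]
        rw [PySem.Dict.keys_insert_of_contains dB _ hcB]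
        split_ifs <;> simp [hkA1, hkA2, hk]
      · intro k
        simp only [pvStepA, pvStepB, hAne, Bool.false_eq_true, if_false, hmodA, hmodB,
          hgA, hpv, hgB]
        by_cases hki : k = i <;>
          simp [hki, PySem.Dict.get?_insert, PySem.Dict.getD_insert_self, hA, hnew, hpv, hv k]
    | none =>
      have hpv : pvF js = ((js.length : Int), 0) := by simp [pvF, hF]
      constructor
      · simp only [pvStepA, pvStepB, hAne, Bool.false_eq_true, if_false, hmodA, hmodB,
          hgA, hpv, hgB]
        rw [PySem.Dict.keys_insert_of_contains dB _ hcB]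
        split_ifs <;> simp [hkA1, hkA2, hk]
      · intro k
        simp only [pvStepA, pvStepB, hAne, Bool.false_eq_true, if_false, hmodA, hmodB,
          hgA, hpv, hgB]
        by_cases hj : j = 0
        · subst hj
          have hf0 : List.findIdx? (fun v => v != 0) [(0 : Int)] = none := by
            simp [List.findIdx?, List.findIdx?.go]
          have hnew : pvF (js ++ [0]) = ((js.length : Int) + 1, 0) := by
            simp [pvF, List.findIdx?_append, hF, hf0]
          by_cases hki : k = i <;>
            simp [hki, PySem.Dict.get?_insert, PySem.Dict.getD_insert_self, hA, hnew, hpv, hv k]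
        · have hj' : (j == 0) = false := by simp [hj]
          have hf1 : List.findIdx? (fun v => v != 0) [j] = some 0 := by
            simp [List.findIdx?, List.findIdx?.go, hj]
          have hnew : pvF (js ++ [j]) = ((js.length : Int) + 1, 1) := by
            simp [pvF, List.findIdx?_append, hF, hf1]
          by_cases hki : k = i <;>
            simp [hki, hj', PySem.Dict.get?_insert, PySem.Dict.getD_insert_self, hA, hnew, hpv, hv k]

theorem pvLoop_rel (l : List (Int × Int)) (dA : PySem.Dict Int (Int × Int))
    (dB : PySem.Dict Int (List Int)) (hk : dA.keys = dB.keys) (hn : dB.keys.Nodup)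
    (hv : ∀ k, dA.get? k = (dB.get? k).map pvF) :
    (l.foldl pvStepA dA).keys = (l.foldl pvStepB dB).keys ∧
      (l.foldl pvStepB dB).keys.Nodup ∧
      ∀ k, (l.foldl pvStepA dA).get? k = ((l.foldl pvStepB dB).get? k).map pvF := by
  induction l generalizing dA dB with
  | nil => exact ⟨hk, hn, hv⟩
  | cons p l ih =>
    obtain ⟨hk', hv'⟩ := pvStep_rel dA dB hk hv p
    have hn' : (pvStepB dB p).keys.Nodup := by
      have he : pvStepB dB p = dB.insert p.1 (dB.getD p.1 [] ++ [p.2]) := rfl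
      rw [he]; exact PySem.Dict.nodup_keys_insert dB _ _ hn
    exact ih (pvStepA dA p) (pvStepB dB p) hk' hn' hv'

theorem pvItems_rel (dA : PySem.Dict Int (Int × Int)) (dB : PySem.Dict Int (List Int))
    (hk : dA.keys = dB.keys) (hn : dB.keys.Nodup)
    (hv : ∀ k, dA.get? k = (dB.get? k).map pvF) :
    dA.items = dB.items.map (fun p => (p.1, pvF p.2)) := by
  have hnA : dA.keys.Nodup := by rw [hk]; exact hn
  have hlen : dA.items.length = dB.items.length := by
    have h1 : dA.keys.length = dB.keys.length := by rw [hk]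
    simpa [PySem.Dict.keys] using h1
  apply List.ext_getElem (by simpa using hlen)
  intro n h1 h2
  have hkeys : dA.items[n].1 = (dB.items.map (fun p => (p.1, pvF p.2)))[n].1 := by
    have hkA : dA.keys = dA.items.map (·.1) := rfl
    have hkB : dB.keys = dB.items.map (·.1) := rfl
    have hn1 : n < dA.keys.length := by simpa [hkA] using h1
    have := congrArg (fun l => l[n]? ) hk
    simp only [hkA, hkB, List.getElem?_map] at this
    have h2' : n < dB.items.length := by simpa using h2
    simp only [List.getElem?_eq_getElem (by simpa [hkA] using h1 : n < dA.items.length),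
      List.getElem?_eq_getElem h2', Option.map_some] at this
    simpa [List.getElem_map] using this
  have hmA : dA.items[n] ∈ dA.items := List.getElem_mem _
  have hmB : dB.items[n]'(by simpa using h2) ∈ dB.items := List.getElem_mem _
  have hgA : dA.get? dA.items[n].1 = some dA.items[n].2 :=
    PySem.Dict.get?_of_mem_items _ (by rw [Prod.mk.eta]; exact hmA) hnA
  have hgB : dB.get? (dB.items[n]'(by simpa using h2)).1
      = some ((dB.items[n]'(by simpa using h2)).2) :=
    PySem.Dict.get?_of_mem_items _ (by rw [Prod.mk.eta]; exact hmB) hn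
  have hk2 : dA.items[n].1 = (dB.items[n]'(by simpa using h2)).1 := by
    simpa [List.getElem_map] using hkeys
  have hval : some dA.items[n].2 = some (pvF ((dB.items[n]'(by simpa using h2)).2)) := by
    rw [← hgA, hv, hk2, hgB, Option.map_some]
  have hval' : dA.items[n].2 = pvF ((dB.items[n]'(by simpa using h2)).2) :=
    Option.some.inj hval
  have : (dB.items.map (fun p => (p.1, pvF p.2)))[n]
      = ((dB.items[n]'(by simpa using h2)).1, pvF ((dB.items[n]'(by simpa using h2)).2)) := by
    simp [List.getElem_map]
  rw [this, ← hk2, ← hval', Prod.mk.eta]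

theorem solution_eq_alt (lottery : List (Int × Int)) :
    solution lottery = solution_alt lottery := by
  obtain ⟨hk, hn, hv⟩ := pvLoop_rel lottery PySem.Dict.empty PySem.Dict.empty
    (by rw [PySem.Dict.keys_empty, PySem.Dict.keys_empty])
    (by rw [PySem.Dict.keys_empty]; exact List.nodup_nil)
    (by intro k; rw [PySem.Dict.get?_empty, PySem.Dict.get?_empty]; rfl)
  have hnA : (lottery.foldl pvStepA PySem.Dict.empty).keys.Nodup := by rw [hk]; exact hn
  have hitems := pvItems_rel _ _ hk hn hv
  simp only [solution, solution_alt]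
  set dA := lottery.foldl pvStepA PySem.Dict.empty with hdA
  set dB := lottery.foldl pvStepB PySem.Dict.empty with hdB
  have hA : dA.keys.foldl (fun (s : Int × Int) e =>
        if (dA.getD e (0, 0)).2 == 1 then (s.1 + (dA.getD e (0, 0)).1, s.2 + 1) else s)
      (0, 0)
      = dA.items.foldl (fun (s : Int × Int) p =>
        if p.2.2 == 1 then (s.1 + p.2.1, s.2 + 1) else s) (0, 0) := by
    have hkA : dA.keys = dA.items.map (·.1) := rfl
    rw [hkA, List.foldl_map]
    apply PySem.List.foldl_congr_mem
    intro acc x hx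
    have hg : dA.getD x.1 (0, 0) = x.2 := by
      have h := PySem.Dict.get?_of_mem_items _ (by rw [Prod.mk.eta]; exact hx) hnA
      exact PySem.Dict.getD_of_get?_eq_some dA (0, 0) h
    rw [hg]
  have hB : dB.values.foldl (fun (s : Int × Int) js =>
        match js.findIdx? (fun v => v != 0) with
        | some idx => (s.1 + ((idx : Int) + 1), s.2 + 1)
        | none => s) (0, 0)
      = dB.items.foldl (fun (s : Int × Int) p =>
        match p.2.findIdx? (fun v => v != 0) with
        | some idx => (s.1 + ((idx : Int) + 1), s.2 + 1)
        | none => s) (0, 0) := by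
    have hvB : dB.values = dB.items.map (·.2) := rfl
    rw [hvB, List.foldl_map]
  rw [hA, hB, hitems, List.foldl_map]
  have hfun : dB.items.foldl (fun (s : Int × Int) p =>
        if ((p.1, pvF p.2) : Int × Int × Int).2.2 == 1
        then (s.1 + ((p.1, pvF p.2) : Int × Int × Int).2.1, s.2 + 1) else s) (0, 0)
      = dB.items.foldl (fun (s : Int × Int) p =>
        match p.2.findIdx? (fun v => v != 0) with
        | some idx => (s.1 + ((idx : Int) + 1), s.2 + 1)
        | none => s) (0, 0) := by
    apply PySem.List.foldl_congr_mem
    intro acc x _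
    cases hFx : x.2.findIdx? (fun v => v != 0) with
    | some m => simp [pvF, hFx]
    | none => simp [pvF, hFx]
  rw [hfun]

-- ===== VERDICT (by name: the statement is the Claim_ definition above) =====
theorem solution_spec : Claim_equal_solution := by
  intro lottery _
  unfold Spec_solution
  exact solution_eq_alt lottery
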